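-- pv_equiv track=rewrite | github.com/getfounded/bizy | community_packages/langchain/langgraph_nodes/business_logic_node.py | route_decision
-- ===== SOURCE A (Python) =====
-- from typing import Any, Dict, List, Optional, TypedDict
--
-- class BusinessLogicState(TypedDict):
--     """State for business logic evaluation in LangGraph."""
--     input_data: Dict[str, Any]
--     rule_results: List[Dict[str, Any]]
--     decisions: List[str]
--     current_framework: Optional[str]
--     execution_path: List[str]
--     final_output: Optional[Dict[str, Any]]
--
-- def route_decision(state: BusinessLogicState) -> str:
--     """Route to next node based on rule evaluation results."""
--     decisions = state["decisions"]
--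
--     # Routing logic based on decisions
--     if all(d == "approve" for d in decisions):
--         return "approved_path"
--     elif any(d == "escalate" for d in decisions):
--         return "escalation_path"
--     elif any(d == "reject" for d in decisions):
--         return "rejection_path"
--     else:
--         return "review_path"
-- ===== SOURCE B (Python) =====
-- def route_decision(state):
--     """Route to next node based on rule evaluation results (single tallying pass)."""
--     decisions = state["decisions"]
--     total = 0
--     approve = 0
--     has_escalate = False
--     has_reject = False
--     for d in decisions:
--         total += 1
--         if d == "approve":
--             approve += 1
--         if d == "escalate":
--             has_escalate = True
--         if d == "reject":
--             has_reject = True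
--     if approve == total:
--         return "approved_path"
--     if has_escalate:
--         return "escalation_path"
--     if has_reject:
--         return "rejection_path"
--     return "review_path"
-- ===== Notes on version B (the rewrite author's own statement) =====
-- stated objective: alternative
-- what changed: Replaced the three separate short-circuiting scans (all/any/any) by one tallying pass that accumulates a total count, an approve count and two booleans, with the route chosen from that accumulated state afterwards.
import Mathlib
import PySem

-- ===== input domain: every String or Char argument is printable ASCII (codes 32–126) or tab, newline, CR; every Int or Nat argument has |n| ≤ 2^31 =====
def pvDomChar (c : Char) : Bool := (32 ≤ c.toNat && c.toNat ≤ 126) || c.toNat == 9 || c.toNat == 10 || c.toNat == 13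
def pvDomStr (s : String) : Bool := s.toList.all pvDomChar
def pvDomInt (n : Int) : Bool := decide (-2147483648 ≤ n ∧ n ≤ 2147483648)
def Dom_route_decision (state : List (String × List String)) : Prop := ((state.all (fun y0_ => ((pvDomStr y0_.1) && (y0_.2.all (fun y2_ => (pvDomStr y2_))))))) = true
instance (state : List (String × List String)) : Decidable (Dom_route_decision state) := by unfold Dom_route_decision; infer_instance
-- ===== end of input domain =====

-- B is one tallying pass (counts + flags, decision afterwards) instead of A's three short-circuiting scans; same cost, different decomposition.

-- ===== PORT A =====
-- state["decisions"]: first-match lookup in the association list (KeyError → none, excluded by Pre_)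
def route_decision (state : List (String × List String)) : String :=
  match (state.find? (fun p => p.1 == "decisions")).map (·.2) with
  | none => ""   -- unreachable under Pre_ (Python raises KeyError)
  | some decisions =>
    if decisions.all (fun d => d == "approve") then "approved_path"
    else if decisions.any (fun d => d == "escalate") then "escalation_path"
    else if decisions.any (fun d => d == "reject") then "rejection_path"
    else "review_path"

-- ===== PORT B =====
-- the loop state of Source B: (total, approve, has_escalate, has_reject)
def routeTally (decisions : List String) : Int × Int × Bool × Bool :=
  decisions.foldl
    (fun acc d =>
      (acc.1 + 1,
       acc.2.1 + (if d == "approve" then 1 else 0),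
       acc.2.2.1 || d == "escalate",
       acc.2.2.2 || d == "reject"))
    (0, 0, false, false)

def route_decision_alt (state : List (String × List String)) : String :=
  match (state.find? (fun p => p.1 == "decisions")).map (·.2) with
  | none => ""   -- unreachable under Pre_ (Python raises KeyError)
  | some decisions =>
    let t := routeTally decisions
    if t.2.1 == t.1 then "approved_path"
    else if t.2.2.1 then "escalation_path"
    else if t.2.2.2 then "rejection_path"
    else "review_path"

-- ===== PRECONDITION & SPEC =====
-- Pre_ excludes only states without a "decisions" key, on which Python A raises KeyError.
def Pre_route_decision (state : List (String × List String)) : Prop :=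
  (state.find? (fun p => p.1 == "decisions")).isSome = true
instance (state : List (String × List String)) : Decidable (Pre_route_decision state) := by
  unfold Pre_route_decision; infer_instance

def pvWitness_route_decision : (List (String × List String)) := [("decisions", ["approve", "reject"])]

def Spec_route_decision (state : List (String × List String)) (out : String) : Prop := out = route_decision_alt state
instance (state : List (String × List String)) (out : String) : Decidable (Spec_route_decision state out) := by unfold Spec_route_decision; infer_instance

-- ===== CLAIM (what is proved, stated in full; the proofs are below) =====
def Claim_equal_route_decision : Prop := ∀ (state : List (String × List String)), Dom_route_decision state → Pre_route_decision state → Spec_route_decision state (route_decision state)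

-- ===== LEMMAS AND PROOFS =====

-- characterisation of B's single-pass tally by its three separate scans
theorem routeTally_go (ds : List String) (n a : Int) (e r : Bool) :
    ds.foldl
      (fun acc d =>
        (acc.1 + 1,
         acc.2.1 + (if d == "approve" then 1 else 0),
         acc.2.2.1 || d == "escalate",
         acc.2.2.2 || d == "reject"))
      (n, a, e, r) =
      (n + (ds.length : Int),
       a + (ds.countP (fun d => d == "approve") : Int),
       e || ds.any (fun d => d == "escalate"),
       r || ds.any (fun d => d == "reject")) := by
  induction ds generalizing n a e r with
  | nil => simp
  | cons x xs ih =>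
      simp only [List.foldl_cons, ih, List.length_cons, List.countP_cons, List.any_cons]
      refine Prod.ext ?_ (Prod.ext ?_ (Prod.ext ?_ ?_)) <;> simp
      · ring
      · split <;> ring
      · rw [Bool.or_assoc, Bool.or_comm (x == "escalate")]
      · rw [Bool.or_assoc, Bool.or_comm (x == "reject")]

theorem routeTally_spec (ds : List String) :
    routeTally ds =
      ((ds.length : Int),
       (ds.countP (fun d => d == "approve") : Int),
       ds.any (fun d => d == "escalate"),
       ds.any (fun d => d == "reject")) := by
  unfold routeTally; rw [routeTally_go]; simp

theorem count_approve_eq_length_iff (ds : List String) :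
    ((ds.countP (fun d => d == "approve") : Int) = (ds.length : Int)) ↔ ds.all (fun d => d == "approve") = true := by
  rw [Int.natCast_inj, List.countP_eq_length, List.all_eq_true]

theorem route_decision_spec : Claim_equal_route_decision := by
  intro state _ hpre
  unfold Spec_route_decision route_decision route_decision_alt
  unfold Pre_route_decision at hpre
  obtain ⟨p, hp⟩ := Option.isSome_iff_exists.mp hpre
  rw [hp]
  simp only [Option.map_some]
  rw [routeTally_spec]
  simp only [beq_iff_eq, count_approve_eq_length_iff]
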